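-- pv_equiv track=rewrite | github.com/wyatthoho/quick-rename | utils/stringlist_utils.py | clean_prefix
-- ===== SOURCE A (Python) =====
-- def clean_prefix(names: list[str]) -> list[str]:
--     def remove_prefix(name: str) -> str:
--         for sep in ['_', '-', ' ']:
--             prefix, sep_found, remainder = name.partition(sep)
--             if prefix.isdigit():
--                 return remainder
--         return name
--     return [remove_prefix(name) for name in names]
-- ===== SOURCE B (Python) =====
-- def clean_prefix(names: list[str]) -> list[str]:
--     result = []
--     for name in names:
--         i = 0
--         while i < len(name) and name[i].isdigit():
--             i += 1
--         if i == 0: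
--             result.append(name)          # no numeric prefix
--         elif i == len(name):
--             result.append('')            # all-digit name
--         elif name[i] in '_- ':
--             result.append(name[i + 1:])  # drop prefix and separator
--         else:
--             result.append(name)          # digits not followed by a separator
--     return result
-- ===== Notes on version B (the rewrite author's own statement) =====
-- stated objective: faster
-- what changed: Replaces the per-separator loop of three str.partition + whole-prefix isdigit passes over each name by one single forward scan of the maximal leading digit run, then one check of the character that follows it.
import Mathlib
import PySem

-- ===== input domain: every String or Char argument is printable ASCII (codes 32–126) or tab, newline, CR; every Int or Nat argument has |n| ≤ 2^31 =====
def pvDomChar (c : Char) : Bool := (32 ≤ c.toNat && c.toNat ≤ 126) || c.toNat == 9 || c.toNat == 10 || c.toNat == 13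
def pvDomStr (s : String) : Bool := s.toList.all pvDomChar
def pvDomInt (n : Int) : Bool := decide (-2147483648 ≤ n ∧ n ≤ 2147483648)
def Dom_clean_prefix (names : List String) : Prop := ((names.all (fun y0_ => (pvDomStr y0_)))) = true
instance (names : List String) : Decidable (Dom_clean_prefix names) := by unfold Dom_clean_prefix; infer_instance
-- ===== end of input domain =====

-- B replaces A's three partition/isdigit passes per name by one scan of the leading digit run (measurably faster by constant factor).


-- ===== PORT A =====
-- str.partition ported by hand (no PySem primitive): split at the FIRST occurrence of the
-- one-character separator; exact for Python's name.partition(sep) with a 1-char sep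
-- (the unused middle component sep_found is omitted).
def pvPartitionChar (l : List Char) (s : Char) : List Char × List Char :=
  if l.contains s then (l.takeWhile (· ≠ s), (l.dropWhile (· ≠ s)).tail)
  else (l, [])

-- the inner 'for sep in ['_','-',' ']' loop with its early return
def pvRemovePrefixA (seps : List Char) (l : List Char) : List Char :=
  match seps with
  | [] => l
  | s :: rest =>
      let p := pvPartitionChar l s
      if PySem.Chars.strIsdigit p.1 then p.2 else pvRemovePrefixA rest l

def clean_prefix (names : List String) : List String :=
  names.map (fun name => String.mk (pvRemovePrefixA ['_', '-', ' '] name.toList))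

-- ===== PORT B =====
-- the 'while i < len(name) and name[i].isdigit()' scan: length of the maximal leading digit run
def pvDigRun : List Char → Nat
  | [] => 0
  | c :: cs => if PySem.Chars.isdigit c then pvDigRun cs + 1 else 0

def pvRemovePrefixB (l : List Char) : List Char :=
  let i := pvDigRun l
  if i = 0 then l
  else
    match l.drop i with
    | [] => []                                             -- i == len(name): all-digit name → ''
    | c :: rest => if c = '_' ∨ c = '-' ∨ c = ' ' then rest else l

def clean_prefix_alt (names : List String) : List String :=
  names.map (fun name => String.mk (pvRemovePrefixB name.toList))

-- ===== PRECONDITION & SPEC =====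
def Spec_clean_prefix (names : List String) (out : List String) : Prop := out = clean_prefix_alt names
instance (names : List String) (out : List String) : Decidable (Spec_clean_prefix names out) := by unfold Spec_clean_prefix; infer_instance

-- ===== CLAIM (what is proved, stated in full; the proofs are below) =====
def Claim_equal_clean_prefix : Prop := ∀ (names : List String), Dom_clean_prefix names → Spec_clean_prefix names (clean_prefix names)

-- ===== LEMMAS AND PROOFS =====

theorem pv_strIsdigit_not_head {c : Char} (hc : PySem.Chars.isdigit c = false)
    (d : List Char) (x : List Char) :
    PySem.Chars.strIsdigit (d ++ c :: x) = false := by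
  simp [PySem.Chars.strIsdigit, hc]

theorem pv_strIsdigit_all {d : List Char} (hd : ∀ x ∈ d, PySem.Chars.isdigit x = true)
    (hne : d ≠ []) : PySem.Chars.strIsdigit d = true := by
  simp [PySem.Chars.strIsdigit, hne, List.all_eq_true]
  exact hd

-- takeWhile/dropWhile on an all-q prefix pass over it
theorem pv_tada (q : Char → Bool) (d : List Char) (hq : ∀ x ∈ d, q x = true) (r : List Char) :
    (d ++ r).takeWhile q = d ++ r.takeWhile q ∧ (d ++ r).dropWhile q = r.dropWhile q := by
  induction d with
  | nil => simp
  | cons c cs ih =>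
      have hc : q c = true := hq c (by simp)
      have ih' := ih (fun x hx => hq x (by simp [hx]))
      simp [hc, ih'.1, ih'.2]

theorem pv_contains_append (s : Char) (d : List Char) (hd : ∀ x ∈ d, x ≠ s) (r : List Char) :
    (d ++ r).contains s = r.contains s := by
  simp only [List.contains_eq_mem, List.mem_append, decide_eq_decide]
  constructor
  · rintro (h | h)
    · exact absurd rfl (hd s h)
    · exact h
  · exact Or.inr

theorem pv_ne_of_digit {x s : Char} (hx : PySem.Chars.isdigit x = true)
    (hs : PySem.Chars.isdigit s = false) : x ≠ s := by
  intro h; rw [h] at hx; rw [hx] at hs; cases hs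

-- A's per-separator check fails when the character ending the digit run is not this separator
theorem pv_failD (s : Char) (hs : PySem.Chars.isdigit s = false)
    (d : List Char) (hd : ∀ x ∈ d, PySem.Chars.isdigit x = true)
    (c : Char) (hc : PySem.Chars.isdigit c = false) (hcs : c ≠ s) (t : List Char) :
    PySem.Chars.strIsdigit (pvPartitionChar (d ++ c :: t) s).1 = false := by
  have hda : ∀ x ∈ d, (fun x => decide (x ≠ s)) x = true := by
    intro x hx; simp [pv_ne_of_digit (hd x hx) hs]
  obtain ⟨htw, -⟩ := pv_tada _ d hda (c :: t)
  unfold pvPartitionChar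
  split_ifs with h
  · simp only [htw, List.takeWhile_cons, decide_eq_true_eq]
    rw [if_pos hcs]
    exact pv_strIsdigit_not_head hc d _
  · exact pv_strIsdigit_not_head hc d t

-- the check when the digit run is empty and the separator is the head itself
theorem pv_fail0 (s : Char) (t : List Char) :
    PySem.Chars.strIsdigit (pvPartitionChar (s :: t) s).1 = false := by
  unfold pvPartitionChar
  split_ifs with h
  · simp [PySem.Chars.strIsdigit]
  · simp at h

-- A's check succeeds: nonempty digit run followed by this separator
theorem pv_succ (s : Char) (hs : PySem.Chars.isdigit s = false)
    (d : List Char) (hd : ∀ x ∈ d, PySem.Chars.isdigit x = true) (t : List Char) :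
    pvPartitionChar (d ++ s :: t) s = (d, t) := by
  have hda : ∀ x ∈ d, (fun x => decide (x ≠ s)) x = true := by
    intro x hx; simp [pv_ne_of_digit (hd x hx) hs]
  obtain ⟨htw, hdw⟩ := pv_tada _ d hda (s :: t)
  have hct : (d ++ s :: t).contains s = true := by
    rw [pv_contains_append s d (fun x hx => pv_ne_of_digit (hd x hx) hs)]
    simp [List.contains_eq_mem]
  unfold pvPartitionChar
  rw [if_pos hct, htw, hdw]
  simp

-- the check also succeeds with no separator at all: an all-digit name
theorem pv_succ_nil (s : Char) (hs : PySem.Chars.isdigit s = false)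
    (d : List Char) (hd : ∀ x ∈ d, PySem.Chars.isdigit x = true) :
    pvPartitionChar d s = (d, []) := by
  have hmem : s ∉ d := fun h => pv_ne_of_digit (hd s h) hs rfl
  unfold pvPartitionChar
  rw [if_neg (by simpa using hmem)]

theorem pv_digRun_append (d : List Char) (hd : ∀ x ∈ d, PySem.Chars.isdigit x = true)
    (r : List Char) (hr : r = [] ∨ ∃ c t, r = c :: t ∧ PySem.Chars.isdigit c = false) :
    pvDigRun (d ++ r) = d.length := by
  induction d with
  | nil =>
      rcases hr with h | ⟨c, t, h, hc⟩ <;> subst h <;> simp [pvDigRun, *]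
  | cons x xs ih =>
      have hx : PySem.Chars.isdigit x = true := hd x (by simp)
      simp [pvDigRun, hx, ih (fun y hy => hd y (by simp [hy]))]

theorem pv_dropWhile_head (l : List Char) :
    l.dropWhile PySem.Chars.isdigit = [] ∨
    ∃ c t, l.dropWhile PySem.Chars.isdigit = c :: t ∧ PySem.Chars.isdigit c = false := by
  induction l with
  | nil => exact Or.inl rfl
  | cons x xs ih =>
      by_cases hx : PySem.Chars.isdigit x = true
      · simpa [hx] using ih
      · exact Or.inr ⟨x, xs, by simp [hx], by simpa using hx⟩

theorem pv_main (d r : List Char) (hd : ∀ x ∈ d, PySem.Chars.isdigit x = true)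
    (hr : r = [] ∨ ∃ c t, r = c :: t ∧ PySem.Chars.isdigit c = false) :
    pvRemovePrefixA ['_', '-', ' '] (d ++ r) = pvRemovePrefixB (d ++ r) := by
  have hrun := pv_digRun_append d hd r hr
  by_cases hne : d = []
  · -- empty digit run: both sides return the name unchanged (or [] for the empty name)
    subst hne
    simp only [List.nil_append] at hrun ⊢
    rcases hr with h | ⟨c, t, h, hc⟩
    · subst h; decide
    · subst h
      have hBv : pvRemovePrefixB (c :: t) = c :: t := by
        simp [pvRemovePrefixB, pvDigRun, hc]
      have hf : ∀ s : Char, PySem.Chars.isdigit s = false →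
          PySem.Chars.strIsdigit (pvPartitionChar (c :: t) s).1 = false := by
        intro s hs
        by_cases hcs : c = s
        · subst hcs; exact pv_fail0 c t
        · exact pv_failD s hs [] (by simp) c hc hcs t
      rw [hBv]
      unfold pvRemovePrefixA pvRemovePrefixA pvRemovePrefixA pvRemovePrefixA
      simp [hf '_' (by decide), hf '-' (by decide), hf ' ' (by decide)]
  · have hdig : PySem.Chars.strIsdigit d = true := pv_strIsdigit_all hd hne
    rcases hr with h | ⟨c, t, h, hc⟩
    · -- all-digit name
      subst h
      simp only [List.append_nil] at hrun ⊢
      have hBv : pvRemovePrefixB d = [] := by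
        simp only [pvRemovePrefixB]
        rw [hrun, List.drop_length, if_neg (by simpa using hne)]
      have hpart := pv_succ_nil '_' (by decide) d hd
      rw [hBv]
      unfold pvRemovePrefixA
      simp [hpart, hdig]
    · subst h
      have hBv : pvRemovePrefixB (d ++ c :: t) =
          if c = '_' ∨ c = '-' ∨ c = ' ' then t else d ++ c :: t := by
        simp only [pvRemovePrefixB]
        rw [hrun, List.drop_left, if_neg (by simpa using hne)]
      rw [hBv]
      by_cases h1 : c = '_'
      · subst h1
        have hpart := pv_succ '_' (by decide) d hd t
        unfold pvRemovePrefixA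
        simp [hpart, hdig]
      · have hf1 := pv_failD '_' (by decide) d hd c hc h1 t
        by_cases h2 : c = '-'
        · subst h2
          have hpart := pv_succ '-' (by decide) d hd t
          unfold pvRemovePrefixA pvRemovePrefixA
          simp [hf1, hpart, hdig]
        · have hf2 := pv_failD '-' (by decide) d hd c hc h2 t
          by_cases h3 : c = ' '
          · subst h3
            have hpart := pv_succ ' ' (by decide) d hd t
            unfold pvRemovePrefixA pvRemovePrefixA pvRemovePrefixA
            simp [hf1, hf2, hpart, hdig]
          · have hf3 := pv_failD ' ' (by decide) d hd c hc h3 t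
            unfold pvRemovePrefixA pvRemovePrefixA pvRemovePrefixA pvRemovePrefixA
            simp [hf1, hf2, hf3, h1, h2, h3]

theorem pv_key (l : List Char) : pvRemovePrefixA ['_', '-', ' '] l = pvRemovePrefixB l := by
  have hl : l.takeWhile PySem.Chars.isdigit ++ l.dropWhile PySem.Chars.isdigit = l :=
    List.takeWhile_append_dropWhile
  have hd : ∀ x ∈ l.takeWhile PySem.Chars.isdigit, PySem.Chars.isdigit x = true :=
    fun x hx => List.mem_takeWhile_imp hx
  have h := pv_main _ _ hd (pv_dropWhile_head l)
  rwa [hl] at h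

-- ===== VERDICT (by name: the statement is the Claim_ definition above) =====
theorem clean_prefix_spec : Claim_equal_clean_prefix := by
  intro names _
  unfold Spec_clean_prefix clean_prefix clean_prefix_alt
  simp [pv_key]
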